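-- pv_equiv track=rewrite | github.com/ssf2xguile/LT4Code-for-MyResearch | LT4Code-main/API_seq_rec/Integration/src/04_create_accuracy_json.py | parse_string_into_apis
-- ===== SOURCE A (Python) =====
-- def parse_string_into_apis(str_):
--     apis = []
--     eles = str_.split('.')
--
--     first_lib = eles[0]
--
--     for i in range(1, len(eles)-1):
--         try:
--             module_, library_ = eles[i].strip().rsplit(' ')
--         except:
--             module_, library_ = eles[i].strip().split(' ', 1)
--         apis.append(first_lib.strip() + '.' + module_.strip())
--         first_lib = library_
--
--     apis.append(first_lib.strip() + '.' + eles[-1].strip())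
--     return apis
-- ===== SOURCE B (Python) =====
-- def parse_string_into_apis(str_):
--     eles = str_.split('.')
--     pairs = []
--     for e in eles[1:-1]:
--         module_, library_ = e.strip().split(' ', 1)
--         pairs.append((module_, library_))
--     libs = [eles[0]] + [lib for _, lib in pairs]
--     mods = [mod for mod, _ in pairs] + [eles[-1]]
--     return [lib.strip() + '.' + mod.strip() for lib, mod in zip(libs, mods)]
-- ===== Notes on version B (the rewrite author's own statement) =====
-- stated objective: alternative
-- what changed: Replaces A's single pass with carried first_lib state and its try-rsplit/except-split unpacking by parsing every middle element once with a single maxsplit-1 space split into (module, library) pairs and then zipping the shifted libraries and modules lists.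
import Mathlib
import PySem

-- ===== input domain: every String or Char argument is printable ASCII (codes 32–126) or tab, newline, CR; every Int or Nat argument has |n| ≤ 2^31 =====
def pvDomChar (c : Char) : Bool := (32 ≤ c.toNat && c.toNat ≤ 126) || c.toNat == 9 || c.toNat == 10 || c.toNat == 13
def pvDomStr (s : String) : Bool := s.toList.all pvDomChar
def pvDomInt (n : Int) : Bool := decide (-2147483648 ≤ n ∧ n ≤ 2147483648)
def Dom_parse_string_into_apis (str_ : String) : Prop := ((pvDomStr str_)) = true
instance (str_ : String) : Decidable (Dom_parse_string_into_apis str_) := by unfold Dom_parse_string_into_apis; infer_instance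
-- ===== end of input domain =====

-- B replaces A's one-pass loop with carried state (and its try rsplit / except split unpack) by a
-- parse-all-middles-then-zip-shifted-lists decomposition; same values everywhere A returns (objective: alternative).

-- ===== PORT A =====
-- A-side helper: the 'try: rsplit(' ') / except: split(' ', 1)' two-way unpack of one middle element.
-- Python's rsplit(sep) with no maxsplit computes the same list as split(sep); ported as Str.split?.
-- The final ("","") arm marks exactly the inputs where Python's second unpack raises ValueError
-- (stripped element contains no space); those inputs are excluded by Pre_.
def pvParseMidA (e : String) : String × String :=
  let st := PySem.Str.strip e
  match (PySem.Str.split? st " ").getD [] with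
  | [m, l] => (m, l)
  | _ =>
    match (PySem.Str.splitMax? st " " 1).getD [] with
    | [m, l] => (m, l)
    | _ => ("", "")

def parse_string_into_apis (str_ : String) : List String :=
  let eles := (PySem.Str.split? str_ ".").getD []
  let first_lib := eles.getD 0 ""
  let st := (PySem.List.pyRange 1 ((eles.length : Int) - 1) 1).foldl
    (fun (st : List String × String) i =>
      let p := pvParseMidA (PySem.List.pyGetD eles i "")
      (st.1 ++ [PySem.Str.strip st.2 ++ "." ++ PySem.Str.strip p.1], p.2))
    ([], first_lib)
  st.1 ++ [PySem.Str.strip st.2 ++ "." ++ PySem.Str.strip (PySem.List.pyGetD eles (-1) "")]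

-- ===== PORT B =====
-- B-side helper: the single 'module_, library_ = e.strip().split(' ', 1)' unpack;
-- ("","") marks Python's ValueError (no space in the stripped element), excluded by Pre_.
def pvParseMidB (e : String) : String × String :=
  match (PySem.Str.splitMax? (PySem.Str.strip e) " " 1).getD [] with
  | [m, l] => (m, l)
  | _ => ("", "")

def parse_string_into_apis_alt (str_ : String) : List String :=
  let eles := (PySem.Str.split? str_ ".").getD []
  let pairs := (PySem.List.slice eles (some 1) (some (-1))).map pvParseMidB
  let libs := [eles.getD 0 ""] ++ pairs.map (·.2)
  let mods := pairs.map (·.1) ++ [PySem.List.pyGetD eles (-1) ""]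
  (libs.zip mods).map (fun p => PySem.Str.strip p.1 ++ "." ++ PySem.Str.strip p.2)

-- ===== PRECONDITION & SPEC =====
-- Pre_ excludes exactly the inputs on which Python's A raises ValueError: some middle element of
-- the dot-split has no space in it after stripping (B raises the same ValueError there).
def Pre_parse_string_into_apis (str_ : String) : Prop :=
  ∀ e ∈ PySem.List.slice ((PySem.Str.split? str_ ".").getD []) (some 1) (some (-1)),
    ' ' ∈ (PySem.Str.strip e).toList
instance (str_ : String) : Decidable (Pre_parse_string_into_apis str_) := by
  unfold Pre_parse_string_into_apis; infer_instance
def pvWitness_parse_string_into_apis : String := "os.path join.exists"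
def Spec_parse_string_into_apis (str_ : String) (out : List String) : Prop := out = parse_string_into_apis_alt str_
instance (str_ : String) (out : List String) : Decidable (Spec_parse_string_into_apis str_ out) := by unfold Spec_parse_string_into_apis; infer_instance

-- ===== CLAIM (what is proved, stated in full; the proofs are below) =====
def Claim_equal_parse_string_into_apis : Prop := ∀ (str_ : String), Dom_parse_string_into_apis str_ → Pre_parse_string_into_apis str_ → Spec_parse_string_into_apis str_ (parse_string_into_apis str_)

-- ===== LEMMAS AND PROOFS =====

-- accumulator lemma for splitOn.go
theorem pv_go_acc (sep : List Char) (fuel : Nat) (l cur : List Char) (acc : List (List Char)) :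
    PySem.Chars.splitOn.go sep fuel l cur acc
      = acc.reverse ++ PySem.Chars.splitOn.go sep fuel l cur [] := by
  induction fuel generalizing l cur acc with
  | zero => rw [PySem.Chars.splitOn.go.eq_def, PySem.Chars.splitOn.go.eq_def]; simp
  | succ fuel ih =>
    cases l with
    | nil => rw [PySem.Chars.splitOn.go.eq_def, PySem.Chars.splitOn.go.eq_def]; simp
    | cons c rest =>
      rw [PySem.Chars.splitOn.go.eq_def]
      conv_rhs => rw [PySem.Chars.splitOn.go.eq_def]
      by_cases h : sep.isPrefixOf (c :: rest) = true
      · simp only [h, if_pos]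
        rw [ih _ _ (cur.reverse :: acc), ih _ _ [cur.reverse]]
        simp
      · simp only [h]
        rw [ih, ih rest (c :: cur) acc]
        simp

-- splitOn.go never returns the empty list
theorem pv_go_ne_nil (sep : List Char) (fuel : Nat) (l cur : List Char) :
    PySem.Chars.splitOn.go sep fuel l cur [] ≠ [] := by
  induction fuel generalizing l cur with
  | zero => rw [PySem.Chars.splitOn.go.eq_def]; simp
  | succ fuel ih =>
    cases l with
    | nil => rw [PySem.Chars.splitOn.go.eq_def]; simp
    | cons c rest =>
      rw [PySem.Chars.splitOn.go.eq_def]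
      by_cases h : sep.isPrefixOf (c :: rest) = true
      · simp only [h, if_pos]
        rw [pv_go_acc]
        simp
      · simp only [h]
        exact ih rest (c :: cur)

-- a length-1 result means the separator was never found: the single piece is cur.reverse ++ l
theorem pv_go_len_one (sep : List Char) (fuel : Nat) (l cur : List Char)
    (h : (PySem.Chars.splitOn.go sep fuel l cur []).length = 1) :
    PySem.Chars.splitOn.go sep fuel l cur [] = [cur.reverse ++ l] := by
  induction fuel generalizing l cur with
  | zero => rw [PySem.Chars.splitOn.go.eq_def]; simp
  | succ fuel ih =>
    cases l with
    | nil => rw [PySem.Chars.splitOn.go.eq_def]; simp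
    | cons c rest =>
      rw [PySem.Chars.splitOn.go.eq_def] at h ⊢
      by_cases hp : sep.isPrefixOf (c :: rest) = true
      · simp only [hp, if_pos] at h ⊢
        rw [pv_go_acc] at h
        have := pv_go_ne_nil sep fuel (List.drop sep.length (c :: rest)) []
        simp at h
        cases hx : PySem.Chars.splitOn.go sep fuel (List.drop sep.length (c :: rest)) [] [] with
        | nil => exact absurd hx this
        | cons a as => rw [hx] at h; simp at h
      · simp only [hp] at h ⊢
        rw [ih rest (c :: cur) h]
        simp
-- splitOnMax.go with maxsplit exhausted returns one final piece
theorem pv_goMax_zero (sep : List Char) (fuel : Nat) (l cur : List Char) (acc : List (List Char)) :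
    PySem.Chars.splitOnMax.go sep fuel 0 l cur acc = ((cur.reverse ++ l) :: acc).reverse := by
  cases fuel with
  | zero => rw [PySem.Chars.splitOnMax.go.eq_def]
  | succ fuel =>
    cases l with
    | nil => rw [PySem.Chars.splitOnMax.go.eq_def]; simp
    | cons c rest => rw [PySem.Chars.splitOnMax.go.eq_def]; simp

-- if the full split has exactly two pieces, maxsplit = 1 yields the same two pieces
theorem pv_goMax_one (sep : List Char) (fuel : Nat) (l cur : List Char)
    (h : (PySem.Chars.splitOn.go sep fuel l cur []).length = 2) :
    PySem.Chars.splitOnMax.go sep fuel 1 l cur [] = PySem.Chars.splitOn.go sep fuel l cur [] := by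
  induction fuel generalizing l cur with
  | zero => rw [PySem.Chars.splitOnMax.go.eq_def, PySem.Chars.splitOn.go.eq_def]
  | succ fuel ih =>
    cases l with
    | nil => rw [PySem.Chars.splitOnMax.go.eq_def, PySem.Chars.splitOn.go.eq_def]
    | cons c rest =>
      rw [PySem.Chars.splitOnMax.go.eq_def]
      conv_rhs => rw [PySem.Chars.splitOn.go.eq_def]
      rw [PySem.Chars.splitOn.go.eq_def] at h
      by_cases hp : sep.isPrefixOf (c :: rest) = true
      · simp only [hp, if_pos, if_neg (by norm_num : ¬ ((1 : Nat) = 0))] at h ⊢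
        rw [pv_go_acc] at h ⊢
        have h1 : (PySem.Chars.splitOn.go sep fuel (List.drop sep.length (c :: rest)) [] []).length = 1 := by
          simp at h; omega
        rw [pv_go_len_one _ _ _ _ h1]
        have : (1 : Nat) - 1 = 0 := rfl
        rw [this, pv_goMax_zero]
        simp
      · simp only [hp] at h ⊢
        exact ih rest (c :: cur) h

-- the two middle-element parsers agree on every string
theorem pvParseMid_eq (e : String) : pvParseMidA e = pvParseMidB e := by
  unfold pvParseMidA pvParseMidB
  simp only [PySem.Str.split?, PySem.Str.splitMax?, PySem.Chars.split?, PySem.Chars.splitMax?,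
    if_neg (by decide : ¬ (" ".toList.isEmpty = true)), Option.map_some, Option.getD_some]
  rcases hsp : PySem.Chars.splitOn (PySem.Str.strip e).toList " ".toList with _ | ⟨x, _ | ⟨y, _ | ⟨z, zs⟩⟩⟩
  · simp
  · simp
  · have h2 : (PySem.Chars.splitOn (PySem.Str.strip e).toList " ".toList).length = 2 := by
      rw [hsp]; rfl
    unfold PySem.Chars.splitOn at h2 hsp
    have hm := pv_goMax_one " ".toList ((PySem.Str.strip e).toList.length + 1)
      (PySem.Str.strip e).toList [] h2
    unfold PySem.Chars.splitOnMax
    rw [if_neg (by norm_num : ¬((1:Int) < 0))]; simp only [Int.toNat_one]; rw [hm, hsp]; rfl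
  · simp

-- xs[1:-1] is tail-then-dropLast
theorem pv_slice_one_neg_one {α : Type} (xs : List α) :
    PySem.List.slice xs (some 1) (some (-1)) = xs.tail.dropLast := by
  unfold PySem.List.slice PySem.List.clampIdx
  cases xs with
  | nil => simp
  | cons a as =>
    simp only [List.length_cons, List.tail_cons]
    rw [List.dropLast_eq_take]
    norm_num
    rw [if_neg (by simp)]
    omega

-- the carried-state fold over the middle elements, characterised as B's zip of shifted lists
theorem pv_fold_zip (mids : List String) (acc : List String) (lib0 : String) :
    mids.foldl
      (fun (st : List String × String) e =>
        (st.1 ++ [PySem.Str.strip st.2 ++ "." ++ PySem.Str.strip (pvParseMidB e).1], (pvParseMidB e).2))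
      (acc, lib0)
    = (acc ++ (((lib0 :: (mids.map pvParseMidB).map (·.2)).zip ((mids.map pvParseMidB).map (·.1))).map
          (fun p => PySem.Str.strip p.1 ++ "." ++ PySem.Str.strip p.2)),
       ((mids.map pvParseMidB).map (·.2)).getLastD lib0) := by
  induction mids generalizing acc lib0 with
  | nil => simp
  | cons e mids ih =>
    simp only [List.foldl_cons, List.map_cons, List.zip_cons_cons, List.map_cons,
      List.getLastD_cons]
    rw [ih]
    simp [List.append_assoc]

-- zipping a (k+1)-list against (k-list ++ [z]) splits off the last pair
theorem pv_zip_last {α : Type} (heads tails : List α) (lib0 z : α)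
    (h : tails.length = heads.length) :
    (lib0 :: tails).zip (heads ++ [z])
      = ((lib0 :: tails).zip heads) ++ [(tails.getLastD lib0, z)] := by
  induction heads generalizing tails lib0 with
  | nil =>
    cases tails with
    | nil => simp
    | cons t ts => simp at h
  | cons hhd htl ih =>
    cases tails with
    | nil => simp at h
    | cons t ts =>
      simp only [List.length_cons] at h
      simp only [List.cons_append, List.zip_cons_cons, List.getLastD_cons]
      rw [ih ts t (by omega)]

-- ===== VERDICT (by name: the statement is the Claim_ definition above) =====
theorem parse_string_into_apis_spec : Claim_equal_parse_string_into_apis := by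
  intro str_ _ _
  unfold Spec_parse_string_into_apis parse_string_into_apis parse_string_into_apis_alt
  simp only [pvParseMid_eq]
  rcases heles : (PySem.Str.split? str_ ".").getD [] with _ | ⟨e0, es⟩
  · simp [PySem.List.pyRange_one_eq_nil, PySem.List.slice]
  · -- eles = e0 :: es, length = es.length + 1
    have hlen : ((e0 :: es).length : Int) - 1 = (((e0 :: es).dropLast).length : Int) := by
      simp [List.length_dropLast]
    rw [hlen]
    have hcongr :
        (PySem.List.pyRange 1 (((e0 :: es).dropLast).length : Int) 1).foldl
          (fun (st : List String × String) i =>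
            let p := pvParseMidB (PySem.List.pyGetD (e0 :: es) i "")
            (st.1 ++ [PySem.Str.strip st.2 ++ "." ++ PySem.Str.strip p.1], p.2))
          ([], (e0 :: es).getD 0 "")
        = (PySem.List.pyRange 1 (((e0 :: es).dropLast).length : Int) 1).foldl
          (fun (st : List String × String) i =>
            ((fun (st : List String × String) e =>
                (st.1 ++ [PySem.Str.strip st.2 ++ "." ++ PySem.Str.strip (pvParseMidB e).1],
                 (pvParseMidB e).2)) st (PySem.List.pyGetD ((e0 :: es).dropLast) i "")))
          ([], (e0 :: es).getD 0 "") := by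
      apply PySem.List.foldl_congr_mem
      intro st i hi
      have hmem := (PySem.List.mem_pyRange_one).mp hi
      have h0 : (0:Int) ≤ i := by omega
      have h1 : i < (((e0 :: es).dropLast).length : Int) := hmem.2
      have hgd : PySem.List.pyGetD (e0 :: es) i "" = PySem.List.pyGetD ((e0 :: es).dropLast) i "" := by
        rw [PySem.List.pyGetD_eq_getElem (e0 :: es) "" h0 (by simp at h1 ⊢; omega),
            PySem.List.pyGetD_eq_getElem ((e0 :: es).dropLast) "" h0 (by exact_mod_cast h1),
            List.getElem_dropLast]
      simp only [hgd]
    rw [hcongr, PySem.List.foldl_pyRange_pyGetD' ((e0 :: es).dropLast) ""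
          (fun (st : List String × String) e =>
            (st.1 ++ [PySem.Str.strip st.2 ++ "." ++ PySem.Str.strip (pvParseMidB e).1],
             (pvParseMidB e).2))
          ([], (e0 :: es).getD 0 "") (by norm_num : (0:Int) ≤ 1)]
    have hdt : ((e0 :: es).dropLast).drop (1 : Int).toNat = (e0 :: es).tail.dropLast := by
      simp [List.dropLast_eq_take, List.drop_take]
    rw [hdt, pv_slice_one_neg_one, pv_fold_zip]
    set mids := (e0 :: es).tail.dropLast with hmids
    set pairs := mids.map pvParseMidB with hpairs
    simp only [List.singleton_append]
    rw [pv_zip_last (pairs.map (·.1)) (pairs.map (·.2)) ((e0 :: es).getD 0 "")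
          (PySem.List.pyGetD (e0 :: es) (-1) "") (by simp)]
    simp
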